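-- pv_equiv track=rewrite | github.com/rookinc/xalchemy_lab2 | checkers/check_gram.py | mmT
-- ===== SOURCE A (Python) =====
-- def mmT(M):
--     rows = len(M)
--     cols = len(M[0])
--     out = [[0] * rows for _ in range(rows)]
--     for i in range(rows):
--         for j in range(rows):
--             s = 0
--             for k in range(cols):
--                 s += M[i][k] * M[j][k]
--             out[i][j] = s
--     return out
-- ===== SOURCE B (Python) =====
-- def mmT(M):
--     rows = len(M)
--     cols = len(M[0])
--     out = [[0] * rows for _ in range(rows)]
--     for k in range(cols):
--         col = [row[k] for row in M]
--         for i in range(rows):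
--             for j in range(rows):
--                 out[i][j] += col[i] * col[j]
--     return out
-- ===== Notes on version B (the rewrite author's own statement) =====
-- stated objective: alternative
-- what changed: B computes M*M^T as a sum of rank-1 outer products: it iterates over columns k outermost, extracts column k once, and accumulates col[i]*col[j] into the whole output matrix, instead of computing each (i,j) dot product independently with k innermost.
import Mathlib
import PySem

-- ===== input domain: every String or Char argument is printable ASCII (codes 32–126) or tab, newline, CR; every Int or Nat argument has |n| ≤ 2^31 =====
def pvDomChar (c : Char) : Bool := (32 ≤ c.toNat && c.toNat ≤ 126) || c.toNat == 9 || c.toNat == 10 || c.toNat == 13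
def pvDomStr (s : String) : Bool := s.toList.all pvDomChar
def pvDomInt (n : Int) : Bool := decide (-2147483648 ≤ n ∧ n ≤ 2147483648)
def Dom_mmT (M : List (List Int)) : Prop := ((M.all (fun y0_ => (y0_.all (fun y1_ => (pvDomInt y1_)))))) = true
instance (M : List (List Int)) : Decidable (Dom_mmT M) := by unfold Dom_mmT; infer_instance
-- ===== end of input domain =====

-- B computes M*M^T as a sum of rank-1 column outer products (columns outermost,
-- whole-matrix accumulation) instead of an independent dot product per entry.

-- ===== PORT A =====
def mmT (M : List (List Int)) : List (List Int) :=
  let rows : Int := M.length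
  let cols : Int := (PySem.List.pyGetD M 0 []).length
  let out : List (List Int) := List.replicate M.length (List.replicate M.length (0 : Int))
  (PySem.List.pyRange 0 rows 1).foldl (fun out i =>
    (PySem.List.pyRange 0 rows 1).foldl (fun out j =>
      let s : Int := (PySem.List.pyRange 0 cols 1).foldl (fun s k =>
        s + PySem.List.pyGetD (PySem.List.pyGetD M i []) k 0 *
            PySem.List.pyGetD (PySem.List.pyGetD M j []) k 0) 0
      PySem.List.pySetD out i (PySem.List.pySetD (PySem.List.pyGetD out i []) j s)) out) out

-- ===== PORT B =====
def mmT_alt (M : List (List Int)) : List (List Int) :=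
  let rows : Int := M.length
  let cols : Int := (PySem.List.pyGetD M 0 []).length
  let out : List (List Int) := List.replicate M.length (List.replicate M.length (0 : Int))
  (PySem.List.pyRange 0 cols 1).foldl (fun out k =>
    let col : List Int := M.map (fun row => PySem.List.pyGetD row k 0)
    (PySem.List.pyRange 0 rows 1).foldl (fun out i =>
      (PySem.List.pyRange 0 rows 1).foldl (fun out j =>
        PySem.List.pySetD out i
          (PySem.List.pySetD (PySem.List.pyGetD out i []) j
            (PySem.List.pyGetD (PySem.List.pyGetD out i []) j 0 +
             PySem.List.pyGetD col i 0 * PySem.List.pyGetD col j 0))) out) out) out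

-- ===== PRECONDITION & SPEC =====
-- Pre_ excludes exactly the inputs on which Python A raises IndexError: the empty
-- matrix (M[0]) and matrices having a row shorter than the first row (M[j][k]).
def Pre_mmT (M : List (List Int)) : Prop :=
  M ≠ [] ∧ ∀ r ∈ M, (M.headD []).length ≤ r.length
instance (M : List (List Int)) : Decidable (Pre_mmT M) := by unfold Pre_mmT; infer_instance
def pvWitness_mmT : List (List Int) := [[1, 2], [3, 4]]
def Spec_mmT (M : List (List Int)) (out : List (List Int)) : Prop := out = mmT_alt M
instance (M : List (List Int)) (out : List (List Int)) : Decidable (Spec_mmT M out) := by unfold Spec_mmT; infer_instance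

-- ===== CLAIM (what is proved, stated in full; the proofs are below) =====
def Claim_equal_mmT : Prop := ∀ (M : List (List Int)), Dom_mmT M → Pre_mmT M → Spec_mmT M (mmT M)

-- ===== LEMMAS AND PROOFS =====

-- partial dot product of rows p and q over the first c columns
def pvDot (M : List (List Int)) (c p q : Nat) : Int :=
  (List.range c).foldl (fun s k => s + (M.getD p []).getD k 0 * (M.getD q []).getD k 0) 0

-- an n×n matrix given entrywise by a function
def pvMat (n : Nat) (e : Nat → Nat → Int) : List (List Int) :=
  (List.range n).map (fun p => (List.range n).map (e p))

lemma pvDot_succ (M : List (List Int)) (c p q : Nat) :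
    pvDot M (c + 1) p q
      = pvDot M c p q + (M.getD p []).getD c 0 * (M.getD q []).getD c 0 := by
  unfold pvDot
  rw [List.range_succ, List.foldl_append]
  simp

-- the inner k-fold of port A is pvDot (stated for Nat-cast indices)
lemma pvInnerSum (M : List (List Int)) (c i j : Nat) :
    (PySem.List.pyRange 0 (c : Int) 1).foldl (fun s k =>
        s + PySem.List.pyGetD (PySem.List.pyGetD M (i : Int) []) k 0 *
            PySem.List.pyGetD (PySem.List.pyGetD M (j : Int) []) k 0) 0
      = pvDot M c i j := by
  rw [PySem.List.pyRange_zero_nat, List.foldl_map]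
  unfold pvDot
  apply PySem.List.foldl_congr_mem
  intro s k _
  simp [PySem.List.pyGetD_natCast]

lemma set_map_range {α : Type} (f : Nat → α) (n q : Nat) (v : α) :
    ((List.range n).map f).set q v
      = (List.range n).map (fun q' => if q' = q then v else f q') := by
  apply List.ext_getElem
  · simp
  · intro p h1 h2
    simp only [List.getElem_set, List.getElem_map, List.getElem_range]
    by_cases h : q = p
    · rw [if_pos h, if_pos h.symm]
    · rw [if_neg h, if_neg (fun hh => h hh.symm)]

lemma getD_pvMat (n : Nat) (e : Nat → Nat → Int) (p : Nat) (hp : p < n) :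
    (pvMat n e).getD p [] = (List.range n).map (e p) := by
  unfold pvMat
  rw [List.getD_eq_getElem _ _ (by simpa using hp)]
  simp

lemma getD_getD_pvMat (n : Nat) (e : Nat → Nat → Int) (p q : Nat)
    (hp : p < n) (hq : q < n) : ((pvMat n e).getD p []).getD q 0 = e p q := by
  rw [getD_pvMat n e p hp, List.getD_eq_getElem _ _ (by simpa using hq)]
  simp

-- setting entry (p, q) of a matrix in pvMat form
lemma setE (n : Nat) (e : Nat → Nat → Int) (p q : Nat) (v : Int) (hp : p < n) :
    (pvMat n e).set p (((pvMat n e).getD p []).set q v)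
      = pvMat n (fun p' q' => if p' = p ∧ q' = q then v else e p' q') := by
  rw [getD_pvMat n e p hp, set_map_range]
  unfold pvMat
  rw [set_map_range]
  apply List.map_congr_left
  intro p' _
  by_cases h : p' = p
  · subst h; simp
  · simp [h]

lemma pvMat_congr (n : Nat) (e e' : Nat → Nat → Int)
    (h : ∀ p < n, ∀ q < n, e p q = e' p q) : pvMat n e = pvMat n e' := by
  unfold pvMat
  apply List.map_congr_left
  intro p hp
  apply List.map_congr_left
  intro q hq
  exact h p (List.mem_range.mp hp) q (List.mem_range.mp hq)

lemma pvMat_zero (n : Nat) :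
    List.replicate n (List.replicate n (0 : Int)) = pvMat n (fun _ _ => 0) := by
  unfold pvMat
  simp [List.map_const']

-- A's inner loop for row t, run over j ∈ range u
lemma A_inner (M : List (List Int)) (c n t : Nat) (ht : t < n) (e : Nat → Nat → Int) :
    ∀ (u : Nat),
    (List.range u).foldl (fun out (j : Nat) =>
        PySem.List.pySetD out ((t : Nat) : Int)
          (PySem.List.pySetD (PySem.List.pyGetD out ((t : Nat) : Int) []) ((j : Nat) : Int)
            (pvDot M c t j))) (pvMat n e)
      = pvMat n (fun p q => if p = t ∧ q < u then pvDot M c p q else e p q) := by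
  intro u
  induction u with
  | zero =>
    rw [List.range_zero, List.foldl_nil]
    exact pvMat_congr n _ _ (fun p _ q _ => (if_neg (by omega)).symm)
  | succ u ih =>
    rw [List.range_succ, List.foldl_append, ih]
    simp only [List.foldl_cons, List.foldl_nil,
      PySem.List.pySetD_natCast, PySem.List.pyGetD_natCast]
    rw [setE n _ t u _ ht]
    apply pvMat_congr
    intro p _ q _
    by_cases h1 : p = t ∧ q = u
    · rw [if_pos h1, if_pos (show p = t ∧ q < u + 1 from ⟨h1.1, by omega⟩), h1.1, h1.2]
    · rw [if_neg h1]
      by_cases h2 : p = t ∧ q < u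
      · rw [if_pos h2, if_pos (by omega)]
      · rw [if_neg h2, if_neg (by omega)]

-- A computes the Gram matrix entrywise
lemma mmT_eq (M : List (List Int)) :
    mmT M = pvMat M.length (fun p q => pvDot M (PySem.List.pyGetD M 0 []).length p q) := by
  simp only [mmT]
  rw [pvMat_zero, PySem.List.pyRange_zero_nat M.length, List.foldl_map]
  have key : ∀ (t : Nat), t ≤ M.length →
      (List.range t).foldl (fun out (i : Nat) =>
        (List.map (fun (k : Nat) => (k : Int)) (List.range M.length)).foldl (fun out j =>
          PySem.List.pySetD out ((i : Nat) : Int)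
            (PySem.List.pySetD (PySem.List.pyGetD out ((i : Nat) : Int) []) j
              ((PySem.List.pyRange 0 (((PySem.List.pyGetD M 0 []).length : Nat) : Int) 1).foldl
                (fun s k =>
                  s + PySem.List.pyGetD (PySem.List.pyGetD M ((i : Nat) : Int) []) k 0 *
                      PySem.List.pyGetD (PySem.List.pyGetD M j []) k 0) 0))) out)
        (pvMat M.length (fun _ _ => 0))
      = pvMat M.length (fun p q =>
          if p < t then pvDot M (PySem.List.pyGetD M 0 []).length p q else 0) := by
    intro t
    induction t with
    | zero =>
      rw [List.range_zero, List.foldl_nil]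
      exact fun _ => pvMat_congr _ _ _ (fun p _ q _ => (if_neg (by omega)).symm)
    | succ t ih =>
      intro ht
      rw [List.range_succ, List.foldl_append, ih (by omega)]
      simp only [List.foldl_cons, List.foldl_nil]
      rw [List.foldl_map]
      have hbody := PySem.List.foldl_congr_mem
        (l := List.range M.length)
        (init := pvMat M.length (fun p q =>
          if p < t then pvDot M (PySem.List.pyGetD M 0 []).length p q else 0))
        (f := fun out (j : Nat) =>
          PySem.List.pySetD out ((t : Nat) : Int)
            (PySem.List.pySetD (PySem.List.pyGetD out ((t : Nat) : Int) []) ((j : Nat) : Int)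
              ((PySem.List.pyRange 0 (((PySem.List.pyGetD M 0 []).length : Nat) : Int) 1).foldl
                (fun s k =>
                  s + PySem.List.pyGetD (PySem.List.pyGetD M ((t : Nat) : Int) []) k 0 *
                      PySem.List.pyGetD (PySem.List.pyGetD M ((j : Nat) : Int) []) k 0) 0)))
        (g := fun out (j : Nat) =>
          PySem.List.pySetD out ((t : Nat) : Int)
            (PySem.List.pySetD (PySem.List.pyGetD out ((t : Nat) : Int) []) ((j : Nat) : Int)
              (pvDot M (PySem.List.pyGetD M 0 []).length t j)))
        (by intro out j _; simp only [pvInnerSum])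
      rw [hbody, A_inner M _ M.length t (by omega) _ M.length]
      apply pvMat_congr
      intro p _ q hq
      by_cases hpt : p = t
      · rw [if_pos (show p = t ∧ q < M.length from ⟨hpt, hq⟩), if_pos (by omega)]
      · rw [if_neg (fun hh => hpt hh.1)]
        by_cases hp : p < t
        · rw [if_pos hp, if_pos (by omega)]
        · rw [if_neg hp, if_neg (by omega)]
  refine (key M.length le_rfl).trans (pvMat_congr _ _ _ (fun p hp q _ => if_pos hp))

-- B's innermost loop (row t, add col[t]*col[j] at (t, j)), run over j ∈ range u
lemma B_row (n : Nat) (col : List Int) (t : Nat) (ht : t < n) (e : Nat → Nat → Int) :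
    ∀ (u : Nat), u ≤ n →
    (List.range u).foldl (fun out (j : Nat) =>
        PySem.List.pySetD out ((t : Nat) : Int)
          (PySem.List.pySetD (PySem.List.pyGetD out ((t : Nat) : Int) []) ((j : Nat) : Int)
            (PySem.List.pyGetD (PySem.List.pyGetD out ((t : Nat) : Int) []) ((j : Nat) : Int) 0 +
             PySem.List.pyGetD col ((t : Nat) : Int) 0 *
             PySem.List.pyGetD col ((j : Nat) : Int) 0))) (pvMat n e)
      = pvMat n (fun p q =>
          if p = t ∧ q < u then e p q + col.getD t 0 * col.getD q 0 else e p q) := by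
  intro u
  induction u with
  | zero =>
    intro _
    rw [List.range_zero, List.foldl_nil]
    exact pvMat_congr n _ _ (fun p _ q _ => (if_neg (by omega)).symm)
  | succ u ih =>
    intro hu
    rw [List.range_succ, List.foldl_append, ih (by omega)]
    simp only [List.foldl_cons, List.foldl_nil,
      PySem.List.pySetD_natCast, PySem.List.pyGetD_natCast]
    rw [getD_getD_pvMat n _ t u ht (by omega),
      if_neg (show ¬ (t = t ∧ u < u) by omega), setE n _ t u _ ht]
    apply pvMat_congr
    intro p _ q _
    by_cases h1 : p = t ∧ q = u
    · rw [if_pos h1, if_pos (show p = t ∧ q < u + 1 from ⟨h1.1, by omega⟩), h1.1, h1.2]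
    · rw [if_neg h1]
      by_cases h2 : p = t ∧ q < u
      · rw [if_pos h2, if_pos (by omega)]
      · rw [if_neg h2, if_neg (by omega)]

-- B's middle loop (one column pass), run over i ∈ range u
lemma B_outer (n : Nat) (col : List Int) (e : Nat → Nat → Int) :
    ∀ (u : Nat), u ≤ n →
    (List.range u).foldl (fun out (i : Nat) =>
        (List.map (fun (k : Nat) => (k : Int)) (List.range n)).foldl (fun out j =>
          PySem.List.pySetD out ((i : Nat) : Int)
            (PySem.List.pySetD (PySem.List.pyGetD out ((i : Nat) : Int) []) j
              (PySem.List.pyGetD (PySem.List.pyGetD out ((i : Nat) : Int) []) j 0 +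
               PySem.List.pyGetD col ((i : Nat) : Int) 0 *
               PySem.List.pyGetD col j 0))) out) (pvMat n e)
      = pvMat n (fun p q =>
          if p < u then e p q + col.getD p 0 * col.getD q 0 else e p q) := by
  intro u
  induction u with
  | zero =>
    intro _
    rw [List.range_zero, List.foldl_nil]
    exact pvMat_congr n _ _ (fun p _ q _ => (if_neg (by omega)).symm)
  | succ u ih =>
    intro hu
    rw [List.range_succ, List.foldl_append, ih (by omega)]
    simp only [List.foldl_cons, List.foldl_nil]
    rw [List.foldl_map, B_row n col u (by omega) _ n le_rfl]
    apply pvMat_congr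
    intro p _ q hq
    by_cases hpu : p = u
    · rw [if_pos (show p = u ∧ q < n from ⟨hpu, hq⟩),
        if_neg (show ¬ p < u by omega), if_pos (show p < u + 1 by omega), hpu]
    · rw [if_neg (fun hh => hpu hh.1)]
      by_cases hp : p < u
      · rw [if_pos hp, if_pos (by omega)]
      · rw [if_neg hp, if_neg (by omega)]

-- the extracted column, read at a valid row index
lemma col_getD (M : List (List Int)) (k p : Nat) (hp : p < M.length) :
    (M.map (fun row => PySem.List.pyGetD row ((k : Nat) : Int) 0)).getD p 0
      = (M.getD p []).getD k 0 := by
  rw [List.getD_eq_getElem _ _ (by simpa using hp), List.getElem_map,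
    PySem.List.pyGetD_natCast, List.getD_eq_getElem _ _ hp]

-- B computes the Gram matrix too
lemma mmT_alt_eq (M : List (List Int)) :
    mmT_alt M = pvMat M.length (fun p q => pvDot M (PySem.List.pyGetD M 0 []).length p q) := by
  simp only [mmT_alt]
  rw [pvMat_zero, PySem.List.pyRange_zero_nat (PySem.List.pyGetD M 0 []).length, List.foldl_map]
  have key : ∀ (c : Nat),
      (List.range c).foldl (fun out (k : Nat) =>
        (PySem.List.pyRange 0 ((M.length : Nat) : Int) 1).foldl (fun out i =>
          (PySem.List.pyRange 0 ((M.length : Nat) : Int) 1).foldl (fun out j =>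
            PySem.List.pySetD out i
              (PySem.List.pySetD (PySem.List.pyGetD out i []) j
                (PySem.List.pyGetD (PySem.List.pyGetD out i []) j 0 +
                 PySem.List.pyGetD (M.map (fun row => PySem.List.pyGetD row ((k : Nat) : Int) 0)) i 0 *
                 PySem.List.pyGetD (M.map (fun row => PySem.List.pyGetD row ((k : Nat) : Int) 0)) j 0)))
            out) out) (pvMat M.length (fun _ _ => 0))
      = pvMat M.length (fun p q => pvDot M c p q) := by
    intro c
    induction c with
    | zero =>
      rw [List.range_zero, List.foldl_nil]
      exact pvMat_congr _ _ _ (fun p _ q _ => rfl)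
    | succ c ih =>
      rw [List.range_succ, List.foldl_append, ih]
      simp only [List.foldl_cons, List.foldl_nil]
      rw [PySem.List.pyRange_zero_nat M.length, List.foldl_map,
        B_outer M.length _ _ M.length le_rfl]
      apply pvMat_congr
      intro p hp q hq
      rw [if_pos hp, col_getD M c p hp, col_getD M c q hq, pvDot_succ]
  exact key (PySem.List.pyGetD M 0 []).length

-- ===== VERDICT (by name: the statement is the Claim_ definition above) =====
theorem mmT_spec : Claim_equal_mmT := by
  intro M _ _
  unfold Spec_mmT
  rw [mmT_eq, mmT_alt_eq]
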